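-- pv_equiv track=rewrite | github.com/bledden/anomaly-hunter | src/agents/root_cause_agent.py | _cluster_anomalies
-- ===== SOURCE A (Python) =====
-- from typing import Dict, Any, Optional, List
--
-- def _cluster_anomalies(anomaly_indices: List[int]) -> List[int]:
--     """Cluster anomalies by temporal proximity"""
--
--     if not anomaly_indices:
--         return []
--
--     # Simple clustering: anomalies within 5 indices are in same cluster
--     clusters = []
--     current_cluster = [anomaly_indices[0]]
--
--     for i in range(1, len(anomaly_indices)):
--         if anomaly_indices[i] - anomaly_indices[i-1] <= 5:
--             current_cluster.append(anomaly_indices[i])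
--         else:
--             clusters.append(current_cluster[0])  # Representative index
--             current_cluster = [anomaly_indices[i]]
--
--     if current_cluster:
--         clusters.append(current_cluster[0])
--
--     return clusters[:10]  # Top 10 clusters
-- ===== SOURCE B (Python) =====
-- from typing import Dict, Any, Optional, List
--
-- def _cluster_anomalies(anomaly_indices: List[int]) -> List[int]:
--     """Cluster anomalies by temporal proximity.
--
--     Recursive decomposition: each call peels one whole cluster off the front
--     (its first element is the representative, the rest of the run is skipped),
--     then recurses on the remaining suffix with one less slot of the budget of
--     10 representatives; recursion stops when the budget or the list runs out.
--     """
--     def go(xs: List[int], budget: int) -> List[int]: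
--         if not xs or budget == 0:
--             return []
--         j = 1
--         while j < len(xs) and xs[j] - xs[j - 1] <= 5:
--             j += 1
--         return [xs[0]] + go(xs[j:], budget - 1)
--     return go(anomaly_indices, 10)
-- ===== Notes on version B (the rewrite author's own statement) =====
-- stated objective: alternative
-- what changed: Replaces A's iterative scan with (clusters, current_cluster) accumulator state and a final [:10] slice by a recursion that peels one whole gap-run off the front per call, carrying an explicit budget of 10 so no post-hoc slice and no accumulator lists exist.
import Mathlib
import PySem

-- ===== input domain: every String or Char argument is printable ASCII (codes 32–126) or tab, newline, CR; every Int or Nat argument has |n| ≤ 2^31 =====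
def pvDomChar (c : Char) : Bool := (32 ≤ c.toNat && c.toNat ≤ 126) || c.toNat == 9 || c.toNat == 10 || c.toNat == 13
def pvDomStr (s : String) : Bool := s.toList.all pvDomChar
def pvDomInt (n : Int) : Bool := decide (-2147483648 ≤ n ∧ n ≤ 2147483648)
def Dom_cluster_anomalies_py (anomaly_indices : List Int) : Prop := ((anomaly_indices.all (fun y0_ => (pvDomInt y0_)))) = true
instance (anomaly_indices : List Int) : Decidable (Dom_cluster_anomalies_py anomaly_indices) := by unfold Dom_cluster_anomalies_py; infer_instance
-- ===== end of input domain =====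

-- B replaces A's iterative scan with (clusters, current_cluster) accumulator state and a
-- final [:10] slice by a budgeted recursion that peels one whole gap-run per call; same O(n).

-- ===== PORT A =====
-- literal transliteration of A: index loop with (clusters, current_cluster) state
def cluster_anomalies_py (anomaly_indices : List Int) : List Int :=
  if anomaly_indices = [] then []
  else
    let s := (PySem.List.pyRange 1 (anomaly_indices.length : Int) 1).foldl
      (fun (st : List Int × List Int) i =>
        if PySem.List.pyGetD anomaly_indices i 0 - PySem.List.pyGetD anomaly_indices (i - 1) 0 ≤ 5 then
          (st.1, st.2 ++ [PySem.List.pyGetD anomaly_indices i 0])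
        else
          (st.1 ++ [PySem.List.pyGetD st.2 0 0], [PySem.List.pyGetD anomaly_indices i 0]))
      ([], [PySem.List.pyGetD anomaly_indices 0 0])
    let clusters := if s.2 ≠ [] then s.1 ++ [PySem.List.pyGetD s.2 0 0] else s.1
    PySem.List.slice clusters none (some 10)

-- ===== PORT B =====
-- B's inner while loop: skip the rest of the current gap-run (gaps ≤ 5), return the suffix xs[j:]
def pvSkipRun (prev : Int) (xs : List Int) : List Int :=
  match xs with
  | [] => []
  | y :: t => if y - prev ≤ 5 then pvSkipRun y t else y :: t

-- B's recursive helper go(xs, budget)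
def pvGo (xs : List Int) (budget : Nat) : List Int :=
  match xs, budget with
  | [], _ => []
  | _ :: _, 0 => []
  | x :: rest, Nat.succ k => x :: pvGo (pvSkipRun x rest) k

-- literal transliteration of B: go(anomaly_indices, 10)
def cluster_anomalies_py_alt (anomaly_indices : List Int) : List Int :=
  pvGo anomaly_indices 10

-- ===== PRECONDITION & SPEC =====
def Spec_cluster_anomalies_py (anomaly_indices : List Int) (out : List Int) : Prop := out = cluster_anomalies_py_alt anomaly_indices
instance (anomaly_indices : List Int) (out : List Int) : Decidable (Spec_cluster_anomalies_py anomaly_indices out) := by unfold Spec_cluster_anomalies_py; infer_instance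

-- ===== CLAIM (what is proved, stated in full; the proofs are below) =====
def Claim_equal_cluster_anomalies_py : Prop := ∀ (anomaly_indices : List Int), Dom_cluster_anomalies_py anomaly_indices → Spec_cluster_anomalies_py anomaly_indices (cluster_anomalies_py anomaly_indices)

-- ===== LEMMAS AND PROOFS =====

-- A's loop body, abstracted over the pair (previous element, current element)
def pvStep (st : List Int × List Int) (p y : Int) : List Int × List Int :=
  if y - p ≤ 5 then (st.1, st.2 ++ [y]) else (st.1 ++ [PySem.List.pyGetD st.2 0 0], [y])

-- recursion over the tail carrying the previous element
def pvPairFold (prev : Int) (rest : List Int) (st : List Int × List Int) : List Int × List Int :=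
  match rest with
  | [] => st
  | y :: t => pvPairFold y t (pvStep st prev y)

-- the representatives of the tail (first element of each later gap-run)
def pvReps (prev : Int) (rest : List Int) : List Int :=
  match rest with
  | [] => []
  | y :: t => if 5 < y - prev then y :: pvReps y t else pvReps y t

-- all representatives of a list
def pvAll (xs : List Int) : List Int :=
  match xs with
  | [] => []
  | x :: rest => x :: pvReps x rest

theorem pv_range_pair_foldl (rest : List Int) : ∀ (x : Int) (init : List Int × List Int),
    (List.range rest.length).foldl
      (fun st k => pvStep st ((x :: rest).getD k 0) ((x :: rest).getD (k + 1) 0)) init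
    = pvPairFold x rest init := by
  induction rest with
  | nil => intro x init; simp [pvPairFold]
  | cons y t ih =>
    intro x init
    simp only [List.length_cons, List.range_succ_eq_map, List.foldl_cons, List.foldl_map]
    simp only [List.getD_cons_zero, List.getD_cons_succ, pvPairFold]
    exact ih y (pvStep init x y)

theorem pv_pairFold_final (rest : List Int) : ∀ (prev : Int) (acc : List Int) (c0 : Int) (ct : List Int),
    (fun s : List Int × List Int => s.1 ++ [PySem.List.pyGetD s.2 0 0])
      (pvPairFold prev rest (acc, c0 :: ct))
    = acc ++ c0 :: pvReps prev rest := by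
  induction rest with
  | nil => intro prev acc c0 ct; simp [pvPairFold, pvReps, PySem.List.pyGetD]
  | cons y t ih =>
    intro prev acc c0 ct
    simp only [pvPairFold, pvStep, pvReps]
    by_cases h : y - prev ≤ 5
    · rw [if_pos h, if_neg (by omega)]
      simpa using ih y acc c0 (ct ++ [y])
    · rw [if_neg h, if_pos (by omega)]
      have := ih y (acc ++ [PySem.List.pyGetD (c0 :: ct) 0 0]) y []
      simpa [PySem.List.pyGetD] using this

theorem pv_pairFold_snd_ne (rest : List Int) : ∀ (prev : Int) (acc : List Int) (c0 : Int) (ct : List Int),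
    (pvPairFold prev rest (acc, c0 :: ct)).2 ≠ [] := by
  induction rest with
  | nil => intro prev acc c0 ct; simp [pvPairFold]
  | cons y t ih =>
    intro prev acc c0 ct
    simp only [pvPairFold, pvStep]
    by_cases h : y - prev ≤ 5
    · rw [if_pos h]; exact ih y acc c0 (ct ++ [y])
    · rw [if_neg h]; exact ih y _ y []

-- skipping the current run then collecting is exactly pvReps
theorem pv_all_skipRun (rest : List Int) : ∀ (prev : Int),
    pvAll (pvSkipRun prev rest) = pvReps prev rest := by
  induction rest with
  | nil => intro prev; simp [pvSkipRun, pvReps, pvAll]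
  | cons y t ih =>
    intro prev
    simp only [pvSkipRun, pvReps]
    by_cases h : y - prev ≤ 5
    · rw [if_pos h, if_neg (by omega)]; exact ih y
    · rw [if_neg h, if_pos (by omega)]; simp [pvAll]

-- B's budgeted recursion is a take of the full representative list
theorem pv_go_take (k : Nat) : ∀ (xs : List Int), pvGo xs k = (pvAll xs).take k := by
  induction k with
  | zero => intro xs; cases xs <;> simp [pvGo, pvAll]
  | succ k ih =>
    intro xs
    cases xs with
    | nil => simp [pvGo, pvAll]
    | cons x rest =>
      simp only [pvGo, pvAll, List.take_succ_cons]
      rw [ih (pvSkipRun x rest), pv_all_skipRun rest x]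

-- ===== VERDICT (by name: the statement is the Claim_ definition above) =====
theorem cluster_anomalies_py_spec : Claim_equal_cluster_anomalies_py := by
  intro xs _
  unfold Spec_cluster_anomalies_py cluster_anomalies_py cluster_anomalies_py_alt
  match xs with
  | [] => simp [pvGo]
  | x :: rest =>
    simp only [if_neg (List.cons_ne_nil x rest)]
    have hrange :
        (PySem.List.pyRange 1 ((x :: rest).length : Int) 1).foldl
          (fun (st : List Int × List Int) i =>
            if PySem.List.pyGetD (x :: rest) i 0 - PySem.List.pyGetD (x :: rest) (i - 1) 0 ≤ 5 then
              (st.1, st.2 ++ [PySem.List.pyGetD (x :: rest) i 0])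
            else
              (st.1 ++ [PySem.List.pyGetD st.2 0 0], [PySem.List.pyGetD (x :: rest) i 0]))
          ([], [PySem.List.pyGetD (x :: rest) 0 0])
        = pvPairFold x rest ([], [x]) := by
      rw [PySem.List.pyRange_one]
      have hlen : (((x :: rest).length : Int) - 1).toNat = rest.length := by
        simp
      rw [hlen, List.foldl_map]
      have hfun : (fun (st : List Int × List Int) (k : Nat) =>
            if PySem.List.pyGetD (x :: rest) (1 + (k : Int)) 0 - PySem.List.pyGetD (x :: rest) (1 + (k : Int) - 1) 0 ≤ 5 then
              (st.1, st.2 ++ [PySem.List.pyGetD (x :: rest) (1 + (k : Int)) 0])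
            else
              (st.1 ++ [PySem.List.pyGetD st.2 0 0], [PySem.List.pyGetD (x :: rest) (1 + (k : Int)) 0]))
          = (fun st k => pvStep st ((x :: rest).getD k 0) ((x :: rest).getD (k + 1) 0)) := by
        funext st k
        have h1 : (1 : Int) + (k : Int) = ((k + 1 : Nat) : Int) := by omega
        have h2 : (1 : Int) + (k : Int) - 1 = ((k : Nat) : Int) := by omega
        rw [h2, h1, PySem.List.pyGetD_natCast, PySem.List.pyGetD_natCast]
        simp [pvStep]
      rw [hfun, pv_range_pair_foldl]
      simp [PySem.List.pyGetD]
    rw [hrange]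
    rw [if_pos (pv_pairFold_snd_ne rest x [] x [])]
    have := pv_pairFold_final rest x [] x []
    simp only [List.nil_append] at this
    rw [this, pv_go_take 10 (x :: rest)]
    have h10 : (10 : Int) = ((10 : Nat) : Int) := by norm_num
    rw [h10, PySem.List.slice_to_natCast]
    simp [pvAll]
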